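-- pv_equiv track=rewrite | github.com/jhon4than/telegramApi | teste.py | caracteristicas
-- ===== SOURCE A (Python) =====
-- def caracteristicas(data):
--     if data is None:
--         return []
--
--     caracteristicas = []
--     for numero in data:
--         try:
--             numero = int(numero)
--             coluna = (
--                 1
--                 if numero in range(1, 13)
--                 else 2
--                 if numero in range(13, 25)
--                 else 0
--                 if numero == 0
--                 else 3
--                 if numero in range(25, 37)
--                 else 4
--             )
--             caracteristicas.append({"numero": numero, "coluna": coluna})
--         except ValueError:
--             continue
--     return caracteristicas
-- ===== SOURCE B (Python) =====
-- # Table-driven rewrite: a column lookup table is built once from the three dozen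
-- # ranges, and classification becomes two staged passes (parse, then table lookup).
-- _COL = {0: 0}
-- for _col, _rng in ((1, range(1, 13)), (2, range(13, 25)), (3, range(25, 37))):
--     for _n in _rng:
--         _COL[_n] = _col
--
--
-- def caracteristicas(data):
--     if data is None:
--         return []
--     nums = []
--     for s in data:
--         try:
--             nums.append(int(s))
--         except ValueError:
--             pass
--     return [{"numero": n, "coluna": _COL.get(n, 4)} for n in nums]
-- ===== Notes on version B (the rewrite author's own statement) =====
-- stated objective: alternative
-- what changed: Replaced A's per-element conditional cascade of range-membership tests by a precomputed number-to-column lookup table (dict built once from the three dozen ranges) and split the single loop into two staged passes: parse all entries to ints first, then map each through the table with default 4.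
import Mathlib
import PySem

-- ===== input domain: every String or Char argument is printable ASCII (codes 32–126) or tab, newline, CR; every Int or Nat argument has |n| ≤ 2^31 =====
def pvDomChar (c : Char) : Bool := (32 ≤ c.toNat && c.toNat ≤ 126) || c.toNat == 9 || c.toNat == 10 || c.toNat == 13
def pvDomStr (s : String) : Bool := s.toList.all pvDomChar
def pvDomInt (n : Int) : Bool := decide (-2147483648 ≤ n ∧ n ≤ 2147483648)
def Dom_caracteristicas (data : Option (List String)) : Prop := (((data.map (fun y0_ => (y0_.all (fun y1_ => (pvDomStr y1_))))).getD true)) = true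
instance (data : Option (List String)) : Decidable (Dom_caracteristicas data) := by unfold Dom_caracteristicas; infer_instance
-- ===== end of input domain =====

-- B replaces A's per-element range-test cascade by a precomputed number→column lookup
-- table and two staged passes (parse all ints, then map through the table); return value only.

-- ===== PORT A =====
-- literal transliteration of A: one fold over data, appending one dict per parsable
-- entry, column chosen by the conditional cascade of range-membership tests.
def caracteristicas (data : Option (List String)) : List (List (String × Int)) :=
  match data with
  | none => []
  | some xs =>
    xs.foldl (fun acc numero =>
      match PySem.Int.ofStr? numero with
      | none => acc          -- ValueError: continue
      | some n =>
        let coluna : Int :=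
          if n ∈ PySem.List.pyRange 1 13 1 then 1
          else if n ∈ PySem.List.pyRange 13 25 1 then 2
          else if n = 0 then 0
          else if n ∈ PySem.List.pyRange 25 37 1 then 3
          else 4
        acc ++ [[("numero", n), ("coluna", coluna)]]) []

-- ===== PORT B =====
-- module-level table _COL = {0: 0} extended by the three dozen ranges
def colTable : PySem.Dict Int Int :=
  [((1:Int), PySem.List.pyRange 1 13 1),
   (2, PySem.List.pyRange 13 25 1),
   (3, PySem.List.pyRange 25 37 1)].foldl
    (fun d p => p.2.foldl (fun d n => d.insert n p.1) d)
    (PySem.Dict.ofList [(0, 0)])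

def caracteristicas_alt (data : Option (List String)) : List (List (String × Int)) :=
  match data with
  | none => []
  | some xs =>
    let nums : List Int := xs.foldl (fun acc s =>
      match PySem.Int.ofStr? s with
      | none => acc
      | some n => acc ++ [n]) []
    nums.map (fun n => [("numero", n), ("coluna", colTable.getD n 4)])

-- ===== PRECONDITION & SPEC =====
def Spec_caracteristicas (data : Option (List String)) (out : List (List (String × Int))) : Prop := out = caracteristicas_alt data
instance (data : Option (List String)) (out : List (List (String × Int))) : Decidable (Spec_caracteristicas data out) := by unfold Spec_caracteristicas; infer_instance

-- ===== CLAIM (what is proved, stated in full; the proofs are below) =====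
def Claim_equal_caracteristicas : Prop := ∀ (data : Option (List String)), Dom_caracteristicas data → Spec_caracteristicas data (caracteristicas data)

-- ===== LEMMAS AND PROOFS =====

-- inserting every element of ys with the SAME value c: lookup is a membership test
theorem getD_foldl_insert_const (ys : List Int) (d : PySem.Dict Int Int) (c x : Int) :
    (ys.foldl (fun d n => d.insert n c) d).getD x 4
      = if x ∈ ys then c else d.getD x 4 := by
  induction ys generalizing d with
  | nil => simp
  | cons y ys ih =>
    simp only [List.foldl_cons, ih, List.mem_cons]
    by_cases hmem : x ∈ ys
    · simp [hmem]
    · by_cases hxy : x = y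
      · subst hxy; simp [hmem, PySem.Dict.getD_insert_self]
      · simp [hmem, hxy, PySem.Dict.getD_insert_of_ne _ _ _ hxy]

-- the table lookup equals A's cascade on every integer
theorem colTable_getD (n : Int) :
    colTable.getD n 4
      = (if n ∈ PySem.List.pyRange 1 13 1 then (1:Int)
         else if n ∈ PySem.List.pyRange 13 25 1 then 2
         else if n = 0 then 0
         else if n ∈ PySem.List.pyRange 25 37 1 then 3
         else 4) := by
  unfold colTable
  simp only [List.foldl_cons, List.foldl_nil]
  rw [getD_foldl_insert_const, getD_foldl_insert_const, getD_foldl_insert_const,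
      show (PySem.Dict.ofList [((0:Int), (0:Int))]) = PySem.Dict.mk [(0, 0)] from rfl]
  simp only [PySem.List.mem_pyRange_one, PySem.Dict.getD, PySem.Dict.get?_mk_cons]
  split_ifs <;> simp_all [PySem.Dict.get?] <;> omega

-- B's parse pass collects exactly the parsable entries
theorem parse_fold (xs : List String) (acc : List Int) :
    xs.foldl (fun acc s =>
      match PySem.Int.ofStr? s with
      | none => acc
      | some n => acc ++ [n]) acc
    = acc ++ xs.filterMap PySem.Int.ofStr? := by
  induction xs generalizing acc with
  | nil => simp
  | cons x xs ih =>
    simp only [List.foldl_cons, List.filterMap_cons]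
    cases hx : PySem.Int.ofStr? x <;> simp [ih]

-- A's single pass equals the parse pass mapped through the cascade
theorem a_fold (xs : List String) (acc : List (List (String × Int))) :
    xs.foldl (fun acc numero =>
      match PySem.Int.ofStr? numero with
      | none => acc
      | some n =>
        let coluna : Int :=
          if n ∈ PySem.List.pyRange 1 13 1 then 1
          else if n ∈ PySem.List.pyRange 13 25 1 then 2
          else if n = 0 then 0
          else if n ∈ PySem.List.pyRange 25 37 1 then 3
          else 4
        acc ++ [[("numero", n), ("coluna", coluna)]]) acc
    = acc ++ (xs.filterMap PySem.Int.ofStr?).map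
        (fun n => [("numero", n), ("coluna", colTable.getD n 4)]) := by
  induction xs generalizing acc with
  | nil => simp
  | cons x xs ih =>
    cases hx : PySem.Int.ofStr? x with
    | none => simp only [List.foldl_cons, List.filterMap_cons, hx]; exact ih acc
    | some n =>
      simp only [List.foldl_cons, List.filterMap_cons, hx, List.map_cons]
      rw [ih, colTable_getD n]
      simp

-- ===== VERDICT (by name: the statement is the Claim_ definition above) =====
theorem caracteristicas_spec : Claim_equal_caracteristicas := by
  intro data _
  unfold Spec_caracteristicas caracteristicas caracteristicas_alt
  cases data with
  | none => rfl
  | some xs => simpa [parse_fold xs []] using a_fold xs []
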